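-- pv_equiv track=rewrite | github.com/dada8899/structural-isomorphism | web/backend/services/llm_service.py | _find_string_end
-- ===== SOURCE A (Python) =====
-- def _find_string_end(text: str, start: int) -> int:
--     """Find the index of the closing quote of a JSON string starting at `start`."""
--     i = start
--     n = len(text)
--     while i < n:
--         c = text[i]
--         if c == "\\":
--             i += 2
--             continue
--         if c == '"':
--             return i
--         i += 1
--     return -1
-- ===== SOURCE B (Python) =====
-- def _find_string_end(text: str, start: int) -> int:
--     """Find the index of the closing quote of a JSON string starting at `start`."""
--     i = start
--     while True:
--         q = text.find('"', i)
--         if q == -1: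
--             return -1
--         j = q - 1
--         while j >= start and text[j] == "\\":
--             j -= 1
--         if (q - 1 - j) % 2 == 0:
--             return q
--         i = q + 1
-- ===== Notes on version B (the rewrite author's own statement) =====
-- stated objective: alternative
-- what changed: A scans every character one by one (stepping 2 over each backslash); B jumps directly between candidate quotes with str.find and decides escapedness by the parity of the consecutive backslash run before each candidate.
-- outside the precondition, e.g. on _find_string_end('"ab', -1): A returns 0, B returns -1; on _find_string_end('', -3): A raises IndexError, B returns -1
import Mathlib
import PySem

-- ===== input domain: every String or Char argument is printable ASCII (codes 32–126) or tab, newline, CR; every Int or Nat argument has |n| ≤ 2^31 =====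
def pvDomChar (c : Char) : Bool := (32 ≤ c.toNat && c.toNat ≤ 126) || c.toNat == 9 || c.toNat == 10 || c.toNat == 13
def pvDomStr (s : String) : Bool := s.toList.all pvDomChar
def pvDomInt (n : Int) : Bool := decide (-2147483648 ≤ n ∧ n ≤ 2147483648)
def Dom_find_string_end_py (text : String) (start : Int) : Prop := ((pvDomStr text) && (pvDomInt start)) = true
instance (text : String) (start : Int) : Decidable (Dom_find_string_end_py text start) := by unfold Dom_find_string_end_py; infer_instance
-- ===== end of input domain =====

-- B replaces A's per-character scan by jumping between candidate quotes with str.find and deciding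
-- escapedness by the parity of the backslash run before each candidate (alternative decomposition).
-- Loops are ported with a fuel argument that only makes the same computation total.

-- ===== PORT A =====
-- A's while loop: step 2 over a backslash, return i at a quote, else step 1; -1 when i reaches n.
-- pyGet? = none is Python's IndexError (only reachable for start < -len(text)); excluded by Pre_.
def findStrEndA (l : List Char) (n : Int) : Nat → Int → Int
  | 0, _ => -1
  | fuel+1, i =>
    if i < n then
      match PySem.List.pyGet? l i with
      | none => -2  -- IndexError in Python; unreachable under Pre_
      | some c =>
        if c = '\\' then findStrEndA l n fuel (i + 2)
        else if c = '"' then i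
        else findStrEndA l n fuel (i + 1)
    else -1

def find_string_end_py (text : String) (start : Int) : Int :=
  findStrEndA text.toList (text.toList.length : Int) ((text.toList.length : Int) + 1 - start).toNat start

-- ===== PORT B =====
-- B's inner loop: walk j down from q-1 while j >= start and text[j] is a backslash; returns final j.
def countBackB (l : List Char) (start : Int) : Nat → Int → Int
  | 0, j => j
  | fuel+1, j =>
    if j ≥ start ∧ PySem.List.pyGet? l j = some '\\' then countBackB l start fuel (j - 1) else j

-- B's outer loop: q = text.find('"', i); stop at -1; return q on an even backslash run, else i = q+1.
def findStrEndB (l : List Char) (start : Int) : Nat → Int → Int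
  | 0, _ => -1
  | fuel+1, i =>
    let q := PySem.Chars.findFrom l ['"'] i none
    if q = -1 then -1
    else
      let j := countBackB l start (q - start + 1).toNat (q - 1)
      if PySem.Int.mod (q - 1 - j) 2 = 0 then q
      else findStrEndB l start fuel (q + 1)

def find_string_end_py_alt (text : String) (start : Int) : Int :=
  findStrEndB text.toList start ((text.toList.length : Int) + 2 - start).toNat start

-- ===== PRECONDITION & SPEC =====
-- Pre_ excludes negative start, a corner outside this JSON helper's natural domain where A's value
-- is an artefact of Python's negative indexing: A raises IndexError for start < -len(text) and
-- otherwise scans with wrapped-around indices, while B's find-based scan clamps the position.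
def Pre_find_string_end_py (text : String) (start : Int) : Prop := 0 ≤ start
instance (text : String) (start : Int) : Decidable (Pre_find_string_end_py text start) := by unfold Pre_find_string_end_py; infer_instance

def pvWitness_find_string_end_py : String × Int := ("a\\\"x\"", 0)

def Spec_find_string_end_py (text : String) (start : Int) (out : Int) : Prop := out = find_string_end_py_alt text start
instance (text : String) (start : Int) (out : Int) : Decidable (Spec_find_string_end_py text start out) := by unfold Spec_find_string_end_py; infer_instance

-- ===== CLAIM (what is proved, stated in full; the proofs are below) =====
def Claim_equal_find_string_end_py : Prop := ∀ (text : String) (start : Int), Dom_find_string_end_py text start → Pre_find_string_end_py text start → Spec_find_string_end_py text start (find_string_end_py text start)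

-- ===== LEMMAS AND PROOFS =====

-- a non-(-1) result of find(sub, i) lies in [i, length].
theorem pvFindFromBounds (l sub : List Char) (i : Int)
    (h : PySem.Chars.findFrom l sub i none ≠ -1) :
    i ≤ PySem.Chars.findFrom l sub i none ∧ PySem.Chars.findFrom l sub i none ≤ (l.length : Int) := by
  have haux : ∀ m : Nat, -1 ≤ PySem.Chars.find (List.drop m (List.take ((l.length : Int)).toNat l)) sub ∧
      PySem.Chars.find (List.drop m (List.take ((l.length : Int)).toNat l)) sub ≤ ((l.length - m : Nat) : Int) := by
    intro m
    refine ⟨PySem.Chars.neg_one_le_find _ _, ?_⟩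
    have := PySem.Chars.find_le_length (List.drop m (List.take ((l.length : Int)).toNat l)) sub
    simpa [List.length_drop] using this
  unfold PySem.Chars.findFrom at h ⊢
  dsimp only at h ⊢
  split_ifs at h ⊢ <;>
    first
      | omega
      | (have h1 := haux (Int.toNat (0:Int)); have h2 := haux ((i + (l.length : Int)).toNat);
         have h3 := haux (Int.toNat i); omega)

theorem findFrom_gt (l sub : List Char) (i : Int) (h0 : 0 ≤ i) (hgt : (l.length : Int) < i) :
    PySem.Chars.findFrom l sub i none = -1 := by
  unfold PySem.Chars.findFrom
  dsimp only
  split_ifs <;> first | rfl | omega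

-- number of consecutive backslashes at positions q-1, q-2, … (stopping at lo): the run before q.
def runCnt (l : List Char) (lo : Nat) (q : Nat) : Nat :=
  if lo < q ∧ l[q-1]? = some '\\' then runCnt l lo (q-1) + 1 else 0
termination_by q
decreasing_by omega

theorem pvSingletonPrefix (c : Char) (xs : List Char) : [c] <+: xs ↔ xs.head? = some c := by
  cases xs with
  | nil => simp
  | cons y ys => simp [List.cons_prefix_cons, eq_comm]

-- B's inner loop computes the backslash run before q (bounded below at start).
theorem countBackB_eq (l : List Char) (start : Int) (hs : 0 ≤ start) :
    ∀ (f : Nat) (q : Nat), start ≤ (q : Int) → (q : Int) - start < (f : Int) →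
      countBackB l start f ((q : Int) - 1) = (q : Int) - 1 - (runCnt l start.toNat q : Int) := by
  intro f
  induction f with
  | zero => intro q hq hf; omega
  | succ f ih =>
    intro q hq hf
    rw [countBackB, runCnt]
    rcases Nat.eq_zero_or_pos q with h0 | h0
    · subst h0
      have hstart : start = 0 := le_antisymm (by exact_mod_cast hq) hs
      rw [if_neg (by omega), if_neg (by simp [hstart])]
      simp
    · have hc1 : ((q : Int) - 1) = ((q - 1 : Nat) : Int) := by omega
      have hget : PySem.List.pyGet? l ((q : Int) - 1) = l[q-1]? := by
        rw [hc1, PySem.List.pyGet?_natCast]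
      by_cases hbs : l[q-1]? = some '\\'
      · by_cases hlo : start.toNat < q
        · rw [if_pos ⟨by omega, by rw [hget]; exact hbs⟩, if_pos ⟨hlo, hbs⟩]
          have := ih (q-1) (by omega) (by omega)
          rw [show (q : Int) - 1 - 1 = ((q - 1 : Nat) : Int) - 1 by omega, this]
          push_cast
          omega
        · rw [if_neg (by omega), if_neg (by omega)]
          omega
      · rw [if_neg (by rw [hget]; tauto), if_neg (by tauto)]
        omega

-- the run is insensitive to the lower bound below a non-backslash position m.
theorem runCnt_stop (l : List Char) (m lo : Nat) (hx : ¬ l[m]? = some '\\') (hlo : lo ≤ m) :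
    ∀ q : Nat, m + 1 ≤ q → runCnt l lo q = runCnt l (m+1) q := by
  intro q
  induction q using Nat.strong_induction_on with
  | _ q ih =>
    intro hq
    rw [runCnt]
    conv_rhs => rw [runCnt]
    by_cases hbs : l[q-1]? = some '\\'
    · have hne : q - 1 ≠ m := fun h => hx (h ▸ hbs)
      rw [if_pos ⟨by omega, hbs⟩, if_pos ⟨by omega, hbs⟩, ih (q-1) (by omega) (by omega)]
    · rw [if_neg (by tauto), if_neg (by tauto)]

-- raising the lower bound by 2 inside backslashes preserves the run's parity.
theorem runCnt_parity (l : List Char) (i : Nat) (hx : l[i]? = some '\\') :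
    ∀ q : Nat, i + 2 ≤ q → runCnt l i q % 2 = runCnt l (i+2) q % 2 := by
  intro q
  induction q using Nat.strong_induction_on with
  | _ q ih =>
    intro hq
    by_cases hbs : l[q-1]? = some '\\'
    · by_cases hqe : q = i + 2
      · subst hqe
        rw [runCnt, if_pos ⟨by omega, hbs⟩]
        rw [runCnt, if_pos ⟨by omega, by simpa using hx⟩]
        rw [runCnt, if_neg (by omega)]
        rw [runCnt, if_neg (by omega)]
      · rw [runCnt, if_pos ⟨by omega, hbs⟩]
        conv_rhs => rw [runCnt, if_pos ⟨by omega, hbs⟩]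
        have := ih (q-1) (by omega) (by omega)
        omega
    · rw [runCnt, if_neg (by tauto)]
      conv_rhs => rw [runCnt]
      rw [if_neg (by tauto)]

theorem A_stop (l : List Char) (f : Nat) (i : Int) (hge : (l.length : Int) ≤ i) :
    findStrEndA l (l.length : Int) f i = -1 := by
  cases f with
  | zero => rfl
  | succ f => rw [findStrEndA, if_neg (not_lt.mpr hge)]

theorem A_step (l : List Char) (f : Nat) (i : Int) (h0 : 0 ≤ i) (hlt : i < (l.length : Int))
    (c : Char) (hc : l[i.toNat]? = some c) :
    findStrEndA l (l.length : Int) (f+1) i =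
      if c = '\\' then findStrEndA l (l.length : Int) f (i + 2)
      else if c = '"' then i else findStrEndA l (l.length : Int) f (i + 1) := by
  have hget : PySem.List.pyGet? l i = some c := by
    rw [← Int.toNat_of_nonneg h0, PySem.List.pyGet?_natCast]; exact hc
  rw [findStrEndA, if_pos hlt, hget]

-- the result does not depend on the fuel, as long as the fuel is sufficient.
theorem A_irrel (l : List Char) :
    ∀ (f1 f2 : Nat) (i : Int), (l.length : Int) < i + f1 → (l.length : Int) < i + f2 →
      findStrEndA l (l.length : Int) f1 i = findStrEndA l (l.length : Int) f2 i := by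
  intro f1
  induction f1 with
  | zero => intro f2 i h1 h2; rw [A_stop l 0 i (by omega), A_stop l f2 i (by omega)]
  | succ f1 ih =>
    intro f2 i h1 h2
    by_cases hge : (l.length : Int) ≤ i
    · rw [A_stop l _ i hge, A_stop l f2 i hge]
    · obtain ⟨f2', rfl⟩ : ∃ f2', f2 = f2' + 1 := ⟨f2 - 1, by omega⟩
      rw [findStrEndA, findStrEndA]
      rw [if_pos (by omega), if_pos (by omega)]
      cases PySem.List.pyGet? l i with
      | none => rfl
      | some c =>
        dsimp only
        split_ifs
        · exact ih f2' (i+2) (by omega) (by omega)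
        · rfl
        · exact ih f2' (i+1) (by omega) (by omega)

-- A returns -1 when no quote occurs at or after i.
theorem A_noquote (l : List Char) :
    ∀ (f : Nat) (i : Int), (l.length : Int) < i + f → 0 ≤ i →
      (∀ m : Nat, i.toNat ≤ m → l[m]? ≠ some '"') →
      findStrEndA l (l.length : Int) f i = -1 := by
  intro f
  induction f with
  | zero => intro i hf h0 hnq; rfl
  | succ f ih =>
    intro i hf h0 hnq
    by_cases hge : (l.length : Int) ≤ i
    · exact A_stop l _ i hge
    · obtain ⟨c, hc⟩ : ∃ c, l[i.toNat]? = some c :=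
        ⟨l[i.toNat]'(by omega), List.getElem?_eq_getElem (by omega)⟩
      rw [A_step l f i h0 (by omega) c hc]
      have hcq : c ≠ '"' := fun h => hnq i.toNat le_rfl (h ▸ hc)
      by_cases hbs : c = '\\'
      · rw [if_pos hbs]
        exact ih _ (by omega) (by omega) (fun m hm => hnq m (by omega))
      · rw [if_neg hbs, if_neg hcq]
        exact ih _ (by omega) (by omega) (fun m hm => hnq m (by omega))

-- A's scan, started at i, reaches the first quote q and returns it iff the backslash run
-- before q (bounded at i) is even; on an odd run it continues from q+1.
theorem A_quote (l : List Char) :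
    ∀ (f : Nat) (i : Int) (q : Nat), (l.length : Int) < i + f → 0 ≤ i → i.toNat ≤ q → q < l.length →
      l[q]? = some '"' → (∀ m : Nat, i.toNat ≤ m → m < q → l[m]? ≠ some '"') →
      findStrEndA l (l.length : Int) f i =
        if runCnt l i.toNat q % 2 = 0 then (q : Int)
        else findStrEndA l (l.length : Int) f ((q : Int) + 1) := by
  intro f
  induction f with
  | zero => intro i q hf h0 hiq hql hq hmin; omega
  | succ f ih =>
    intro i q hf h0 hiq hql hq hmin
    by_cases heq : i.toNat = q
    · rw [A_step l f i h0 (by omega) '"' (by rw [heq]; exact hq)]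
      rw [if_neg (by decide), if_pos rfl]
      have hrc : runCnt l i.toNat q = 0 := by
        rw [runCnt]; exact if_neg (fun h => absurd h.1 (by omega))
      rw [hrc]
      norm_num
      omega
    · have hiq' : i.toNat < q := by omega
      obtain ⟨c, hc⟩ : ∃ c, l[i.toNat]? = some c :=
        ⟨l[i.toNat]'(by omega), List.getElem?_eq_getElem (by omega)⟩
      have hcq : c ≠ '"' := fun h => hmin i.toNat le_rfl hiq' (h ▸ hc)
      rw [A_step l f i h0 (by omega) c hc]
      by_cases hbs : c = '\\'
      · rw [if_pos hbs]
        subst hbs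
        by_cases h2 : i.toNat + 1 = q
        · have hrc : runCnt l i.toNat q = 1 := by
            rw [runCnt, if_pos ⟨hiq', by rw [show q - 1 = i.toNat by omega]; exact hc⟩]
            rw [show q - 1 = i.toNat from by omega, runCnt, if_neg (by omega)]
          rw [hrc]
          norm_num
          rw [show i + 2 = (q : Int) + 1 from by omega]
          exact A_irrel l f (f+1) _ (by omega) (by omega)
        · have := ih (i+2) q (by omega) (by omega) (by omega) hql hq
            (fun m hm hmq => hmin m (by omega) hmq)
          rw [this, show ((i : Int)+2).toNat = i.toNat + 2 from by omega]
          have hpar := runCnt_parity l i.toNat hc q (by omega)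
          simp only [← hpar]
          by_cases hp : runCnt l i.toNat q % 2 = 0
          · rw [if_pos hp, if_pos hp]
          · rw [if_neg hp, if_neg hp]
            exact A_irrel l f (f+1) _ (by omega) (by omega)
      · rw [if_neg hbs, if_neg hcq]
        have := ih (i+1) q (by omega) (by omega) (by omega) hql hq
          (fun m hm hmq => hmin m (by omega) hmq)
        rw [this, show ((i : Int)+1).toNat = i.toNat + 1 from by omega]
        have hstop := runCnt_stop l i.toNat i.toNat
          (by rw [hc]; exact fun h => hbs (Option.some.inj h)) le_rfl q (by omega)
        rw [← hstop]
        by_cases hp : runCnt l i.toNat q % 2 = 0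
        · rw [if_pos hp, if_pos hp]
        · rw [if_neg hp, if_neg hp]
          exact A_irrel l f (f+1) _ (by omega) (by omega)

theorem pvMain (l : List Char) (start : Int) (hs : 0 ≤ start) (fA : Nat) :
    ∀ (fB : Nat) (i : Int), start ≤ i →
      (l.length : Int) < i + fA → (l.length : Int) + 1 < i + fB →
      (i = start ∨ (start < i ∧ l[(i-1).toNat]? = some '"')) →
      findStrEndA l (l.length : Int) fA i = findStrEndB l start fB i := by
  intro fB
  induction fB with
  | zero => intro i hsi hfA hfB hinv; rw [A_stop l fA i (by omega)]; rfl
  | succ fB ih =>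
    intro i hsi hfA hfB hinv
    have h0 : 0 ≤ i := le_trans hs hsi
    by_cases hgt : (l.length : Int) < i
    · rw [A_stop l fA i (by omega), findStrEndB]
      dsimp only
      rw [if_pos (findFrom_gt l ['"'] i h0 hgt)]
    · have hicast : i = ((i.toNat : Nat) : Int) := (Int.toNat_of_nonneg h0).symm
      by_cases hfq : PySem.Chars.findFrom l ['"'] i none = -1
      · have hnin : ¬ ['"'] <:+: List.drop i.toNat l := by
          rw [hicast] at hfq
          exact (PySem.Chars.findFrom_natCast_eq_neg_one_iff l ['"'] i.toNat (by omega)).mp hfq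
        have hnq : ∀ m : Nat, i.toNat ≤ m → l[m]? ≠ some '"' := by
          intro m hm hsome
          apply hnin
          rw [List.singleton_infix_iff]
          refine List.mem_of_getElem? (i := m - i.toNat) ?_
          rw [List.getElem?_drop, show i.toNat + (m - i.toNat) = m from by omega]
          exact hsome
        rw [A_noquote l fA i (by omega) h0 hnq, findStrEndB]
        dsimp only
        rw [if_pos hfq]
      · -- a quote was found at Q = findFrom …
        have hbounds := pvFindFromBounds l ['"'] i hfq
        obtain ⟨hge, hpre, hminp⟩ :=
          PySem.Chars.findFrom_natCast_spec l ['"'] i.toNat (by omega) (hicast ▸ hfq)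
        rw [← hicast] at hge hpre hminp
        have hQ0 : 0 ≤ PySem.Chars.findFrom l ['"'] i none := le_trans (by omega) hge
        have hQq : PySem.Chars.findFrom l ['"'] i none =
            ((PySem.Chars.findFrom l ['"'] i none).toNat : Int) := (Int.toNat_of_nonneg hQ0).symm
        set q : Nat := (PySem.Chars.findFrom l ['"'] i none).toNat with hqdef
        have hquote : l[q]? = some '"' := by
          have := (pvSingletonPrefix '"' _).mp hpre
          rwa [List.head?_drop] at this
        have hql : q < l.length := by
          by_contra hcon
          rw [List.getElem?_eq_none (by omega)] at hquote
          simp at hquote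
        have hmin : ∀ m : Nat, i.toNat ≤ m → m < q → l[m]? ≠ some '"' := by
          intro m hm hmq hsome
          apply hminp m hm hmq
          rw [pvSingletonPrefix, List.head?_drop]
          exact hsome
        have hiq : i.toNat ≤ q := by omega
        have hA := A_quote l fA i q (by omega) h0 hiq hql hquote hmin
        have hbb : runCnt l start.toNat q = runCnt l i.toNat q := by
          rcases hinv with rfl | ⟨hlt', hquote'⟩
          · rfl
          · have hx : ¬ l[(i-1).toNat]? = some '\\' := by rw [hquote']; decide
            have hstop := runCnt_stop l (i-1).toNat start.toNat hx (by omega) q (by omega)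
            rw [hstop, show (i-1).toNat + 1 = i.toNat from by omega]
        rw [findStrEndB]
        dsimp only
        rw [if_neg hfq]
        rw [hQq]
        have hcb := countBackB_eq l start hs (((q : Int) - start + 1).toNat) q
          (by omega) (by omega)
        rw [hcb]
        rw [show ((q : Int) - 1 - ((q : Int) - 1 - (runCnt l start.toNat q : Int)))
              = (runCnt l start.toNat q : Int) from by ring, hbb, hA]
        by_cases hpar : runCnt l i.toNat q % 2 = 0
        · rw [if_pos hpar, if_pos (show PySem.Int.mod ((runCnt l i.toNat q : Nat) : Int) 2 = 0 by
            rw [PySem.Int.mod_eq_emod_of_pos (by norm_num)]; omega)]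
        · rw [if_neg hpar, if_neg (show ¬ PySem.Int.mod ((runCnt l i.toNat q : Nat) : Int) 2 = 0 by
            rw [PySem.Int.mod_eq_emod_of_pos (by norm_num)]; omega)]
          refine ih ((q : Int) + 1) (by omega) (by omega) (by omega) (Or.inr ⟨by omega, ?_⟩)
          rw [show ((q : Int) + 1 - 1).toNat = q from by omega]
          exact hquote

-- ===== VERDICT (by name: the statement is the Claim_ definition above) =====
theorem find_string_end_py_spec : Claim_equal_find_string_end_py := by
  intro text start _ hpre
  unfold Pre_find_string_end_py at hpre
  unfold Spec_find_string_end_py find_string_end_py find_string_end_py_alt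
  exact pvMain text.toList start hpre _ _ start le_rfl (by omega) (by omega) (Or.inl rfl)
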